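-- pv_equiv track=rewrite | github.com/bjpl/learn_bash_from_session_data | tests/test_analyzer.py | get_base_command
-- ===== SOURCE A (Python) =====
-- def get_base_command(command):
--     """Extract base command from full command string."""
--     # Handle pipes - get first command
--     if "|" in command:
--         command = command.split("|")[0]
--     # Handle chains - get first command
--     for sep in ["&&", "||", ";"]:
--         if sep in command:
--             command = command.split(sep)[0]
--     # Get first token
--     parts = command.strip().split()
--     if parts:
--         base = parts[0]
--         # Handle sudo
--         if base == "sudo" and len(parts) > 1:
--             base = parts[1]
--         return base
--     return ""
-- ===== SOURCE B (Python) =====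
-- def get_base_command(command):
--     """Extract base command from full command string."""
--     # One left-to-right scan: tokenize by whitespace, stopping at the first
--     # separator ('|', ';', or '&&'); then apply the sudo rule.
--     tokens = []
--     cur = []
--     for i, c in enumerate(command):
--         if c == '|' or c == ';' or (c == '&' and command[i+1:i+2] == '&'):
--             break
--         if c.isspace():
--             if cur:
--                 tokens.append(''.join(cur))
--                 cur = []
--         else:
--             cur.append(c)
--     if cur:
--         tokens.append(''.join(cur))
--     if not tokens:
--         return ''
--     if tokens[0] == 'sudo' and len(tokens) > 1:
--         return tokens[1]
--     return tokens[0]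
-- ===== Notes on version B (the rewrite author's own statement) =====
-- stated objective: alternative
-- what changed: A truncates by repeatedly splitting the string on each separator, then strips and whitespace-splits the remainder; B is a single fused left-to-right character scan that builds the whitespace tokens directly and stops at the first separator occurrence, with no split/strip/slice passes.
import Mathlib
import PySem

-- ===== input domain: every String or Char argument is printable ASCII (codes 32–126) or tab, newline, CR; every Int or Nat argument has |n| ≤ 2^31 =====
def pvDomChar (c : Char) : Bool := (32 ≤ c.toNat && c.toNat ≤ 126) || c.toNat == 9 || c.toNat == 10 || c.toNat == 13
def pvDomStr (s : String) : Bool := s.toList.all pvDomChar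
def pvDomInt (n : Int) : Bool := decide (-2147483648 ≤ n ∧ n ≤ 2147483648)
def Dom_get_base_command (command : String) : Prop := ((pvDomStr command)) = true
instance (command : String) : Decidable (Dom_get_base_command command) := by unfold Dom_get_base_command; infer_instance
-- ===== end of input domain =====

-- B replaces A's staged split/strip/split passes by one fused left-to-right character scan
-- that builds the whitespace tokens directly and stops at the first separator (objective: alternative).

-- ===== PORT A =====
def get_base_command (command : String) : String :=
  let cs := command.toList
  -- if "|" in command: command = command.split("|")[0]
  let cs := if PySem.Chars.isIn ['|'] cs then (PySem.Chars.splitOn cs ['|']).headI else cs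
  -- for sep in ["&&", "||", ";"]: if sep in command: command = command.split(sep)[0]
  let cs := [['&','&'], ['|','|'], [';']].foldl
      (fun c sep => if PySem.Chars.isIn sep c then (PySem.Chars.splitOn c sep).headI else c) cs
  -- parts = command.strip().split()
  let parts := PySem.Chars.split₀ (PySem.Chars.strip cs)
  match parts with
  | [] => ""
  | base :: rest =>
    let base := if base = ['s','u','d','o'] ∧ rest ≠ [] then rest.headI else base
    String.ofList base

-- ===== PORT B =====
-- the for-loop of Source B: tokens/cur are the accumulators; the break duplicates the epilogue
def pvScan : List Char → List Char → List (List Char) → List (List Char)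
  | [], cur, tokens => if cur.isEmpty then tokens.reverse else (cur.reverse :: tokens).reverse
  | c :: rest, cur, tokens =>
    if c = '|' ∨ c = ';' ∨ (c = '&' ∧ rest.take 1 = ['&']) then
      -- break, then the shared "if cur: tokens.append" epilogue
      (if cur.isEmpty then tokens.reverse else (cur.reverse :: tokens).reverse)
    else if PySem.Chars.isspace c then
      (if cur.isEmpty then pvScan rest [] tokens else pvScan rest [] (cur.reverse :: tokens))
    else pvScan rest (c :: cur) tokens

def get_base_command_alt (command : String) : String :=
  match pvScan command.toList [] [] with
  | [] => ""
  | t0 :: ts => if t0 = ['s','u','d','o'] ∧ ts ≠ [] then String.ofList ts.headI else String.ofList t0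

-- ===== PRECONDITION & SPEC =====
def Spec_get_base_command (command : String) (out : String) : Prop := out = get_base_command_alt command
instance (command : String) (out : String) : Decidable (Spec_get_base_command command out) := by unfold Spec_get_base_command; infer_instance

-- ===== CLAIM (what is proved, stated in full; the proofs are below) =====
def Claim_equal_get_base_command : Prop := ∀ (command : String), Dom_get_base_command command → Spec_get_base_command command (get_base_command command)

-- ===== LEMMAS AND PROOFS =====

-- first piece of a split: the chars before the first occurrence of sep
def pvFp (sep : List Char) : List Char → List Char
  | [] => []
  | c :: rest => if sep.isPrefixOf (c :: rest) then [] else c :: pvFp sep rest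

-- index of the first position where sep starts, else length
def pvPos (sep : List Char) : List Char → Nat
  | [] => 0
  | c :: rest => if sep.isPrefixOf (c :: rest) then 0 else pvPos sep rest + 1

-- first position where any of the four separators starts, else length
def pvCut : List Char → Nat
  | [] => 0
  | c :: rest =>
    if ['|'].isPrefixOf (c :: rest) ∨ ['&','&'].isPrefixOf (c :: rest)
        ∨ ['|','|'].isPrefixOf (c :: rest) ∨ [';'].isPrefixOf (c :: rest) then 0
    else pvCut rest + 1

theorem pvFp_eq_take (sep l : List Char) : pvFp sep l = l.take (pvPos sep l) := by
  induction l with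
  | nil => simp [pvFp, pvPos]
  | cons c rest ih =>
    simp only [pvFp, pvPos]
    split_ifs <;> simp [ih]

theorem pvFp_cons {sep l : List Char} {x : Char} {t : List Char}
    (h : pvFp sep l = x :: t) : ∃ t', l = x :: t' := by
  cases l with
  | nil => simp [pvFp] at h
  | cons c rest =>
    refine ⟨rest, ?_⟩
    by_cases hp : sep.isPrefixOf (c :: rest)
    · rw [pvFp, if_pos hp] at h
      cases h
    · rw [pvFp, if_neg hp] at h
      injection h with h1 h2
      rw [h1]

theorem pvFind_go_eq (sep : List Char) (hsep : sep ≠ []) :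
    ∀ (l : List Char) (k : Nat), PySem.Chars.find.go sep l k =
      if pvPos sep l = l.length then -1 else (k : Int) + pvPos sep l := by
  intro l
  induction l with
  | nil => intro k; simp [PySem.Chars.find.go, List.isEmpty_iff, hsep, pvPos]
  | cons c rest ih =>
    intro k
    rw [PySem.Chars.find.go]
    simp only [pvPos, List.length_cons]
    by_cases hp : sep.isPrefixOf (c :: rest)
    · simp [hp]
    · simp only [hp, Bool.false_eq_true, ite_false, ih (k + 1)]
      by_cases hl : pvPos sep rest = rest.length
      · simp [hl]
      · simp [hl]
        ring

theorem pvFind_eq (sep l : List Char) (hsep : sep ≠ []) :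
    PySem.Chars.find l sep = if pvPos sep l = l.length then -1 else (pvPos sep l : Int) := by
  rw [PySem.Chars.find, pvFind_go_eq sep hsep]
  split_ifs <;> simp

theorem pvSplitOn_go_head (sep : List Char) (hsep : sep ≠ []) :
    ∀ (fuel : Nat) (l cur : List Char) (acc : List (List Char)), l.length < fuel →
      ∃ more, PySem.Chars.splitOn.go sep fuel l cur acc =
        acc.reverse ++ (cur.reverse ++ pvFp sep l) :: more := by
  intro fuel
  induction fuel with
  | zero => intro l cur acc h; omega
  | succ f ih =>
    intro l cur acc h
    cases l with
    | nil =>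
      refine ⟨[], ?_⟩
      rw [PySem.Chars.splitOn.go]
      simp [pvFp]
      omega
    | cons c rest =>
      rw [PySem.Chars.splitOn.go]
      by_cases hp : sep.isPrefixOf (c :: rest)
      · simp only [hp, if_true]
        have hlen : (List.drop sep.length (c :: rest)).length < f := by
          have : 1 ≤ sep.length := by cases sep with | nil => exact absurd rfl hsep | cons a as => simp
          simp only [List.length_drop, List.length_cons] at *
          omega
        obtain ⟨more, hmore⟩ := ih _ [] (cur.reverse :: acc) hlen
        refine ⟨pvFp sep (List.drop sep.length (c :: rest)) :: more, ?_⟩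
        rw [hmore]
        simp [pvFp, hp]
      · simp only [hp, Bool.false_eq_true, if_false]
        have hlen : rest.length < f := by simp only [List.length_cons] at h; omega
        obtain ⟨more, hmore⟩ := ih rest (c :: cur) acc hlen
        refine ⟨more, ?_⟩
        rw [hmore]
        simp [pvFp, hp]

theorem pvSplitOn_head (sep l : List Char) (hsep : sep ≠ []) :
    (PySem.Chars.splitOn l sep).headI = pvFp sep l := by
  obtain ⟨more, h⟩ := pvSplitOn_go_head sep hsep (l.length + 1) l [] [] (by omega)
  rw [PySem.Chars.splitOn, h]
  simp

theorem pvStep_eq (sep l : List Char) (hsep : sep ≠ []) :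
    (if PySem.Chars.isIn sep l then (PySem.Chars.splitOn l sep).headI else l) = pvFp sep l := by
  by_cases h : PySem.Chars.isIn sep l = true
  · rw [if_pos h, pvSplitOn_head sep l hsep]
  · rw [if_neg (by simpa using h)]
    have hf : PySem.Chars.find l sep = -1 := by
      simpa [PySem.Chars.isIn, bne] using h
    rw [pvFind_eq sep l hsep] at hf
    have hc : pvPos sep l = l.length := by
      by_contra hcc
      rw [if_neg hcc] at hf
      omega
    rw [pvFp_eq_take, hc, List.take_length]

theorem pvChain (l : List Char) :
    pvFp [';'] (pvFp ['|','|'] (pvFp ['&','&'] (pvFp ['|'] l))) = l.take (pvCut l) := by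
  induction l with
  | nil => simp [pvFp, pvCut]
  | cons c rest ih =>
    by_cases h1 : (['|'] : List Char).isPrefixOf (c :: rest)
    · have hc : c = '|' := ((by simpa [List.isPrefixOf] using h1 : ('|' = c))).symm
      simp [pvFp, pvCut, hc, List.isPrefixOf]
    · have hc1 : ¬ c = '|' := fun hc => h1 (by simp [List.isPrefixOf, hc])
      have e1 : pvFp ['|'] (c :: rest) = c :: pvFp ['|'] rest := by
        simp [pvFp, h1]
      by_cases h2 : (['&','&'] : List Char).isPrefixOf (c :: rest)
      · -- "&&" starts at the head: everything truncates to []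
        have hc2' : '&' = c ∧ (['&'] : List Char).isPrefixOf rest := by
          simpa [List.isPrefixOf] using h2
        have hc2 : c = '&' ∧ (['&'] : List Char).isPrefixOf rest := ⟨hc2'.1.symm, hc2'.2⟩
        obtain ⟨rest', hrest⟩ : ∃ t, rest = '&' :: t := by
          cases rest with
          | nil => simp [List.isPrefixOf] at hc2
          | cons d t =>
            have hd : '&' = d := by simpa [List.isPrefixOf] using hc2.2
            exact ⟨t, by rw [← hd]⟩
        rw [e1]
        have e2 : pvFp ['|'] rest = '&' :: pvFp ['|'] rest' := by
          rw [hrest]; simp [pvFp, List.isPrefixOf]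
        rw [e2]
        have e3 : pvFp ['&','&'] (c :: '&' :: pvFp ['|'] rest') = [] := by
          simp [pvFp, List.isPrefixOf, hc2.1]
        rw [e3]
        have ecut : pvCut (c :: rest) = 0 := by
          rw [pvCut]
          simp [h2]
        rw [ecut]
        simp [pvFp]
      · -- "&&" does not start at the head: the '&&' pass keeps c
        have e3 : pvFp ['&','&'] (c :: pvFp ['|'] rest) = c :: pvFp ['&','&'] (pvFp ['|'] rest) := by
          rw [pvFp]
          rw [if_neg]
          intro hpre
          have hc'' : '&' = c ∧ (['&'] : List Char).isPrefixOf (pvFp ['|'] rest) := by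
            simpa [List.isPrefixOf] using hpre
          have hc' : c = '&' ∧ (['&'] : List Char).isPrefixOf (pvFp ['|'] rest) := ⟨hc''.1.symm, hc''.2⟩
          obtain ⟨t, ht⟩ : ∃ t, pvFp ['|'] rest = '&' :: t := by
            cases hx : pvFp ['|'] rest with
            | nil => rw [hx] at hc'; simp [List.isPrefixOf] at hc'
            | cons d t =>
              have hd : '&' = d := by rw [hx] at hc'; simpa [List.isPrefixOf] using hc'.2
              refine ⟨t, ?_⟩
              rw [← hd]
          obtain ⟨t', ht'⟩ := pvFp_cons ht
          exact h2 (by simp [List.isPrefixOf, hc'.1, ht'])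
        have e4 : pvFp ['|','|'] (c :: pvFp ['&','&'] (pvFp ['|'] rest))
            = c :: pvFp ['|','|'] (pvFp ['&','&'] (pvFp ['|'] rest)) := by
          rw [pvFp, if_neg]
          intro hpre
          simp [List.isPrefixOf] at hpre
          exact hc1 hpre.1.symm
        by_cases h4 : c = ';'
        · -- ";" starts at the head
          rw [e1, e3, e4]
          have e5 : pvFp [';'] (c :: pvFp ['|','|'] (pvFp ['&','&'] (pvFp ['|'] rest))) = [] := by
            simp [pvFp, List.isPrefixOf, h4]
          rw [e5]
          have ecut : pvCut (c :: rest) = 0 := by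
            rw [pvCut]
            simp [List.isPrefixOf, h4]
          rw [ecut]
          simp
        · -- no separator starts at the head: c is kept, recurse
          rw [e1, e3, e4]
          have e5 : pvFp [';'] (c :: pvFp ['|','|'] (pvFp ['&','&'] (pvFp ['|'] rest)))
              = c :: pvFp [';'] (pvFp ['|','|'] (pvFp ['&','&'] (pvFp ['|'] rest))) := by
            rw [pvFp, if_neg]
            intro hpre
            simp [List.isPrefixOf] at hpre
            exact h4 hpre.symm
          rw [e5, ih]
          have ecut : pvCut (c :: rest) = pvCut rest + 1 := by
            rw [pvCut, if_neg]
            push Not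
            refine ⟨h1, h2, ?_, ?_⟩
            · intro hpre
              simp [List.isPrefixOf] at hpre
              exact hc1 hpre.1.symm
            · intro hpre
              simp [List.isPrefixOf] at hpre
              exact h4 hpre.symm
          rw [ecut]
          simp

-- split₀.go consumes an all-whitespace tail into the base case
theorem pvGo_allspace (ws : List Char) (hws : ws.all PySem.Chars.isspace)
    (acc : List (List Char)) : PySem.Chars.split₀.go ws [] acc = acc.reverse := by
  induction ws with
  | nil => simp [PySem.Chars.split₀.go]
  | cons c rest ih =>
    simp only [List.all_cons, Bool.and_eq_true] at hws
    rw [PySem.Chars.split₀.go]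
    simp [hws.1, ih hws.2]

-- trailing whitespace does not change split₀.go
theorem pvGo_append_ws (ws : List Char) (hws : ws.all PySem.Chars.isspace) :
    ∀ (l cur : List Char) (acc : List (List Char)),
      PySem.Chars.split₀.go (l ++ ws) cur acc = PySem.Chars.split₀.go l cur acc := by
  intro l
  induction l with
  | nil =>
    intro cur acc
    cases ws with
    | nil => simp
    | cons w rest =>
      simp only [List.all_cons, Bool.and_eq_true] at hws
      rw [List.nil_append, PySem.Chars.split₀.go, PySem.Chars.split₀.go]
      by_cases hc : cur.isEmpty
      · simp [hws.1, hc, pvGo_allspace rest hws.2]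
      · simp [hws.1, hc, pvGo_allspace rest hws.2]
  | cons c rest ih =>
    intro cur acc
    rw [List.cons_append, PySem.Chars.split₀.go, PySem.Chars.split₀.go]
    by_cases hs : PySem.Chars.isspace c
    · by_cases hc : cur.isEmpty <;> simp [hs, hc, ih]
    · simp [hs, ih]

-- leading whitespace does not change split₀.go when cur is empty
theorem pvGo_lstrip (l : List Char) (acc : List (List Char)) :
    PySem.Chars.split₀.go (l.dropWhile PySem.Chars.isspace) [] acc
      = PySem.Chars.split₀.go l [] acc := by
  induction l with
  | nil => simp
  | cons c rest ih =>
    by_cases hs : PySem.Chars.isspace c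
    · rw [List.dropWhile_cons_of_pos hs, ih, PySem.Chars.split₀.go]
      simp [hs]
    · rw [List.dropWhile_cons_of_neg hs]

theorem pvSplit₀_strip (l : List Char) :
    PySem.Chars.split₀ (PySem.Chars.strip l) = PySem.Chars.split₀ l := by
  rw [PySem.Chars.split₀, PySem.Chars.split₀, PySem.Chars.strip,
    PySem.Chars.rstrip, PySem.Chars.lstrip]
  have hdec : (l.dropWhile PySem.Chars.isspace)
      = ((l.dropWhile PySem.Chars.isspace).reverse.dropWhile PySem.Chars.isspace).reverse
        ++ ((l.dropWhile PySem.Chars.isspace).reverse.takeWhile PySem.Chars.isspace).reverse := by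
    conv_lhs => rw [← List.reverse_reverse (l.dropWhile PySem.Chars.isspace),
      ← List.takeWhile_append_dropWhile (p := PySem.Chars.isspace)
        (l := (l.dropWhile PySem.Chars.isspace).reverse)]
    rw [List.reverse_append]
  have hws : (((l.dropWhile PySem.Chars.isspace).reverse.takeWhile PySem.Chars.isspace).reverse).all
      PySem.Chars.isspace := by
    simp only [List.all_reverse]
    exact List.all_takeWhile
  calc PySem.Chars.split₀.go ((l.dropWhile PySem.Chars.isspace).reverse.dropWhile PySem.Chars.isspace).reverse [] []
      = PySem.Chars.split₀.go (l.dropWhile PySem.Chars.isspace) [] [] := by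
        conv_rhs => rw [hdec]
        rw [pvGo_append_ws _ hws]
    _ = PySem.Chars.split₀.go l [] [] := pvGo_lstrip l []

-- the separator test of B's scan is exactly "one of the four separators starts here"
theorem pvSep_iff (c : Char) (rest : List Char) :
    (c = '|' ∨ c = ';' ∨ (c = '&' ∧ rest.take 1 = ['&'])) ↔
    ((['|'] : List Char).isPrefixOf (c :: rest) ∨ (['&','&'] : List Char).isPrefixOf (c :: rest)
      ∨ (['|','|'] : List Char).isPrefixOf (c :: rest) ∨ ([';'] : List Char).isPrefixOf (c :: rest)) := by
  cases rest with
  | nil => simp [List.isPrefixOf]; tauto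
  | cons d t =>
    simp [List.isPrefixOf]
    constructor
    · rintro (h | h | ⟨h1, h2⟩)
      · tauto
      · tauto
      · exact Or.inr (Or.inl ⟨h1.symm, h2.symm⟩)
    · rintro (h | ⟨h1, h2⟩ | ⟨h1, _⟩ | h)
      · tauto
      · exact Or.inr (Or.inr ⟨h1.symm, h2.symm⟩)
      · tauto
      · tauto

-- B's fused scan computes split₀.go of the prefix before the earliest separator
theorem pvScan_eq (l : List Char) : ∀ (cur : List Char) (acc : List (List Char)),
    pvScan l cur acc = PySem.Chars.split₀.go (l.take (pvCut l)) cur acc := by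
  induction l with
  | nil => intro cur acc; rfl
  | cons c rest ih =>
    intro cur acc
    rw [pvScan]
    by_cases hsep : c = '|' ∨ c = ';' ∨ (c = '&' ∧ rest.take 1 = ['&'])
    · have hcut : pvCut (c :: rest) = 0 := by
        rw [pvCut, if_pos ((pvSep_iff c rest).mp hsep)]
      rw [if_pos hsep, hcut]
      rfl
    · have hcut : pvCut (c :: rest) = pvCut rest + 1 := by
        rw [pvCut, if_neg (fun h => hsep ((pvSep_iff c rest).mpr h))]
      rw [if_neg hsep, hcut, List.take_succ_cons, PySem.Chars.split₀.go]
      by_cases hs : PySem.Chars.isspace c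
      · by_cases hc : cur.isEmpty <;> simp [hs, hc, ih]
      · simp [hs, ih]

-- ===== VERDICT (by name: the statement is the Claim_ definition above) =====
theorem get_base_command_spec : Claim_equal_get_base_command := by
  intro command _
  unfold Spec_get_base_command get_base_command get_base_command_alt
  simp only [List.foldl_cons, List.foldl_nil]
  rw [pvStep_eq ['|'] _ (by simp), pvStep_eq ['&','&'] _ (by simp),
    pvStep_eq ['|','|'] _ (by simp), pvStep_eq [';'] _ (by simp)]
  rw [pvChain, pvSplit₀_strip, pvScan_eq, PySem.Chars.split₀]
  cases PySem.Chars.split₀.go (List.take (pvCut command.toList) command.toList) [] [] with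
  | nil => rfl
  | cons t0 ts => by_cases h : t0 = ['s','u','d','o'] ∧ ts ≠ [] <;> simp [h]
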